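-- pv_equiv track=rewrite | github.com/dianaabdirahmanova711-tech/homeworks | lab1/1.task.py | sorted_unique_chars
-- ===== SOURCE A (Python) =====
-- def sorted_unique_chars(d):
--     chars=set()
--     for a in d:
--         for b in a:
--             if b<'0' or b>'9':
--                 if b !='':
--                     chars.add(b)
--     return sorted(chars)
-- ===== SOURCE B (Python) =====
-- def sorted_unique_chars(d):
--     pool = sorted(c for a in d for c in a)
--     out = []
--     for c in pool:
--         if '0' <= c <= '9':
--             continue
--         if not out or out[-1] != c:
--             out.append(c)
--     return out
-- ===== Notes on version B (the rewrite author's own statement) =====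
-- stated objective: alternative
-- what changed: B sorts the full multiset of characters first and then removes digits and duplicates in one adjacent-comparison scan over the sorted list, instead of A's hash-set insertion with a per-character digit branch followed by sorting the set.
import Mathlib
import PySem

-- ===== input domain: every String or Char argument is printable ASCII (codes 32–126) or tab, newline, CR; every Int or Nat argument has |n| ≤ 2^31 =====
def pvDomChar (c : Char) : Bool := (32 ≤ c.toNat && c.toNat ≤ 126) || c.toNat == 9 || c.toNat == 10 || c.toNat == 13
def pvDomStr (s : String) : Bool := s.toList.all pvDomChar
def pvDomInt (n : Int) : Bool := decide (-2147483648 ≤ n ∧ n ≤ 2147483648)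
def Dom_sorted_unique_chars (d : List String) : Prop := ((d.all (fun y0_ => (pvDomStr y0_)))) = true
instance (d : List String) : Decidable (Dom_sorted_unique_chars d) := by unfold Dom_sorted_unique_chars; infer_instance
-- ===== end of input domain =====

-- B sorts the full multiset of characters first and then removes digits and duplicates in one
-- adjacent-comparison scan over the sorted list, instead of A's set insertion with a per-character
-- digit branch followed by sorting the set (objective: alternative).

-- shared helper: Python iteration over a string yields one-character strings
def pvChr (c : Char) : String := String.ofList [c]

-- ===== PORT A =====
-- A's loop body: the per-character comparison chain, then the (vacuous) b != '' check, then add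
def pvStepA (s : PySem.Set String) (c : Char) : PySem.Set String :=
  let b := pvChr c
  if b < "0" ∨ "9" < b then
    (if b ≠ "" then PySem.Set.add s b else s)
  else s

def sorted_unique_chars (d : List String) : List String :=
  let chars : PySem.Set String :=
    d.foldl (fun s a => a.toList.foldl pvStepA s) PySem.Set.empty
  PySem.List.sorted chars (fun x => x) false

-- ===== PORT B =====
-- B's loop body: skip digits, then append unless equal to the last element kept
def pvStepB (out : List String) (c : String) : List String :=
  if "0" ≤ c ∧ c ≤ "9" then out
  else if out = [] ∨ out.getLast? ≠ some c then out ++ [c] else out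

def sorted_unique_chars_alt (d : List String) : List String :=
  let pool := PySem.List.sorted (d.flatMap (fun a => a.toList.map pvChr)) (fun x => x) false
  pool.foldl pvStepB []

-- ===== PRECONDITION & SPEC =====
def Spec_sorted_unique_chars (d : List String) (out : List String) : Prop := out = sorted_unique_chars_alt d
instance (d : List String) (out : List String) : Decidable (Spec_sorted_unique_chars d out) := by unfold Spec_sorted_unique_chars; infer_instance

-- ===== CLAIM (what is proved, stated in full; the proofs are below) =====
def Claim_equal_sorted_unique_chars : Prop := ∀ (d : List String), Dom_sorted_unique_chars d → Spec_sorted_unique_chars d (sorted_unique_chars d)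

-- ===== LEMMAS AND PROOFS =====

theorem pvChr_ne_empty (c : Char) : pvChr c ≠ "" := by
  intro h; simpa [pvChr] using congrArg String.toList h

theorem pvStepA_eq (s : PySem.Set String) (c : Char) :
    pvStepA s c = if pvChr c < "0" ∨ "9" < pvChr c then PySem.Set.add s (pvChr c) else s := by
  simp [pvStepA, pvChr_ne_empty c]

-- A's inner loop: membership
theorem memA_inner (l : List Char) (s : PySem.Set String) (x : String) :
    x ∈ l.foldl pvStepA s
      ↔ x ∈ s ∨ ∃ c ∈ l, (pvChr c < "0" ∨ "9" < pvChr c) ∧ x = pvChr c := by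
  induction l generalizing s with
  | nil => simp
  | cons c t ih =>
    rw [List.foldl_cons, ih, pvStepA_eq]
    by_cases hP : (pvChr c < "0" ∨ "9" < pvChr c)
    · rw [if_pos hP]
      simp only [PySem.Set.mem_add, List.mem_cons]
      constructor
      · rintro (⟨h | h⟩ | ⟨e, he, hPe, hx⟩)
        · exact Or.inl h
        · exact Or.inr ⟨c, Or.inl rfl, hP, h⟩
        · exact Or.inr ⟨e, Or.inr he, hPe, hx⟩
      · rintro (h | ⟨e, (rfl | he), hPe, hx⟩)
        · exact Or.inl (Or.inl h)
        · exact Or.inl (Or.inr hx)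
        · exact Or.inr ⟨e, he, hPe, hx⟩
    · rw [if_neg hP]
      simp only [List.mem_cons]
      constructor
      · rintro (h | ⟨e, he, hPe, hx⟩)
        · exact Or.inl h
        · exact Or.inr ⟨e, Or.inr he, hPe, hx⟩
      · rintro (h | ⟨e, (rfl | he), hPe, hx⟩)
        · exact Or.inl h
        · exact absurd hPe hP
        · exact Or.inr ⟨e, he, hPe, hx⟩

-- A's outer loop: membership
theorem memA (d : List String) (s : PySem.Set String) (x : String) :
    x ∈ d.foldl (fun s a => a.toList.foldl pvStepA s) s
      ↔ x ∈ s ∨ ∃ a ∈ d, ∃ c ∈ a.toList, (pvChr c < "0" ∨ "9" < pvChr c) ∧ x = pvChr c := by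
  induction d generalizing s with
  | nil => simp
  | cons a t ih =>
    rw [List.foldl_cons, ih, memA_inner]
    simp only [List.mem_cons]
    constructor
    · rintro ((h | h) | ⟨a', ha', hrest⟩)
      · exact Or.inl h
      · exact Or.inr ⟨a, Or.inl rfl, h⟩
      · exact Or.inr ⟨a', Or.inr ha', hrest⟩
    · rintro (h | ⟨a', (rfl | ha'), hrest⟩)
      · exact Or.inl (Or.inl h)
      · exact Or.inl (Or.inr hrest)
      · exact Or.inr ⟨a', ha', hrest⟩

-- A's set is Nodup
theorem nodupA (d : List String) (s : PySem.Set String) (hs : s.Nodup) :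
    (d.foldl (fun s a => a.toList.foldl pvStepA s) s).Nodup := by
  induction d generalizing s with
  | nil => exact hs
  | cons a t ih =>
    refine ih _ ?_
    clear ih
    show (List.foldl pvStepA s a.toList).Nodup
    generalize a.toList = l
    induction l generalizing s with
    | nil => exact hs
    | cons c u ihc =>
      refine ihc _ ?_
      rw [pvStepA_eq]
      split_ifs
      · exact PySem.Set.nodup_add _ _ hs
      · exact hs

-- in a strictly increasing list, the last element is the maximum
theorem pv_last_max (l : List String) (hl : l.Pairwise (· < ·)) (hne : l ≠ []) :
    ∃ g, l.getLast? = some g ∧ ∀ x ∈ l, x ≤ g := by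
  induction l with
  | nil => exact absurd rfl hne
  | cons a t ih =>
    cases t with
    | nil => exact ⟨a, rfl, by simp⟩
    | cons b u =>
      obtain ⟨g, hg, hall⟩ := ih hl.tail (by simp)
      refine ⟨g, by rw [List.getLast?_cons_cons]; exact hg, ?_⟩
      intro x hx
      rcases List.mem_cons.mp hx with rfl | hx'
      · exact le_of_lt (List.rel_of_pairwise_cons hl (List.mem_of_getLast? hg))
      · exact hall x hx'

-- B's scan over a (weakly) sorted list: strictly sorted output, membership = non-digit members
theorem loopB (l : List String) (out : List String)
    (hl : l.Pairwise (· ≤ ·))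
    (hout : out.Pairwise (· < ·))
    (hsep : ∀ x ∈ out, ∀ y ∈ l, x ≤ y) :
    (l.foldl pvStepB out).Pairwise (· < ·) ∧
      (∀ x, x ∈ l.foldl pvStepB out ↔ x ∈ out ∨ (x ∈ l ∧ ¬("0" ≤ x ∧ x ≤ "9"))) := by
  induction l generalizing out with
  | nil => exact ⟨hout, by simp⟩
  | cons c t ih =>
    rw [List.foldl_cons]
    by_cases hd : ("0" ≤ c ∧ c ≤ "9")
    · rw [show pvStepB out c = out from by unfold pvStepB; rw [if_pos hd]]
      obtain ⟨h1, h2⟩ := ih out hl.tail hout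
        (fun x hx y hy => hsep x hx y (List.mem_cons_of_mem c hy))
      refine ⟨h1, fun x => ?_⟩
      rw [h2]
      constructor
      · rintro (h | ⟨hm, hnd⟩)
        · exact Or.inl h
        · exact Or.inr ⟨List.mem_cons_of_mem c hm, hnd⟩
      · rintro (h | ⟨hm, hnd⟩)
        · exact Or.inl h
        · rcases List.mem_cons.mp hm with rfl | hm'
          · exact absurd hd hnd
          · exact Or.inr ⟨hm', hnd⟩
    · by_cases hk : (out = [] ∨ out.getLast? ≠ some c)
      · rw [show pvStepB out c = out ++ [c] from by unfold pvStepB; rw [if_neg hd, if_pos hk]]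
        have hout' : (out ++ [c]).Pairwise (· < ·) := by
          rw [List.pairwise_append]
          refine ⟨hout, List.pairwise_singleton _ _, fun x hx y hy => ?_⟩
          have hyc : y = c := by simpa using hy
          rw [hyc]
          have hle : x ≤ c := hsep x hx c (by simp)
          rcases lt_or_eq_of_le hle with h | hxc
          · exact h
          · exfalso
            obtain ⟨g, hg, hall⟩ := pv_last_max out hout (List.ne_nil_of_mem hx)
            rcases hk with h0 | hne
            · exact absurd hx (by simp [h0])
            · have h1 : g ≤ c := hsep g (List.mem_of_getLast? hg) c (by simp)
              have h2 : c ≤ g := hxc ▸ hall x hx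
              exact hne (by rw [hg, le_antisymm h1 h2])
        obtain ⟨h1, h2⟩ := ih (out ++ [c]) hl.tail hout'
          (fun x hx y hy => by
            rcases List.mem_append.mp hx with hx' | hx'
            · exact hsep x hx' y (List.mem_cons_of_mem c hy)
            · rw [List.mem_singleton] at hx'; subst hx'
              exact List.rel_of_pairwise_cons hl hy)
        refine ⟨h1, fun x => ?_⟩
        rw [h2]
        simp only [List.mem_append, List.mem_cons, List.not_mem_nil, or_false]
        constructor
        · rintro ((h | rfl) | ⟨hm, hnd⟩)
          · exact Or.inl h
          · exact Or.inr ⟨Or.inl rfl, hd⟩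
          · exact Or.inr ⟨Or.inr hm, hnd⟩
        · rintro (h | ⟨(rfl | hm), hnd⟩)
          · exact Or.inl (Or.inl h)
          · exact Or.inl (Or.inr rfl)
          · exact Or.inr ⟨hm, hnd⟩
      · rw [show pvStepB out c = out from by unfold pvStepB; rw [if_neg hd, if_neg hk]]
        obtain ⟨hne, hlast⟩ : out ≠ [] ∧ out.getLast? = some c :=
          ⟨(not_or.mp hk).1, not_not.mp (not_or.mp hk).2⟩
        have hc : c ∈ out := by
          have := List.mem_of_getLast? hlast
          exact this
        obtain ⟨h1, h2⟩ := ih out hl.tail hout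
          (fun x hx y hy => hsep x hx y (List.mem_cons_of_mem c hy))
        refine ⟨h1, fun x => ?_⟩
        rw [h2]
        constructor
        · rintro (h | ⟨hm, hnd⟩)
          · exact Or.inl h
          · exact Or.inr ⟨List.mem_cons_of_mem c hm, hnd⟩
        · rintro (h | ⟨hm, hnd⟩)
          · exact Or.inl h
          · rcases List.mem_cons.mp hm with rfl | hm'
            · exact Or.inl hc
            · exact Or.inr ⟨hm', hnd⟩

-- ===== VERDICT (by name: the statement is the Claim_ definition above) =====
theorem sorted_unique_chars_spec : Claim_equal_sorted_unique_chars := by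
  intro d _
  unfold Spec_sorted_unique_chars sorted_unique_chars sorted_unique_chars_alt
  simp only
  set pool := PySem.List.sorted (d.flatMap (fun a => a.toList.map pvChr)) (fun x : String => x) false with hpool
  obtain ⟨hBsorted, hBmem⟩ := loopB pool []
    (by simpa using PySem.List.sorted_pairwise (d.flatMap (fun a => a.toList.map pvChr)) (fun x : String => x))
    List.Pairwise.nil (by simp)
  apply PySem.List.sorted_eq_of_perm_of_pairwise_lt
  · apply (List.perm_ext_iff_of_nodup (hBsorted.nodup) (nodupA d _ List.nodup_nil)).2
    intro x
    rw [hBmem, memA]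
    simp only [List.not_mem_nil, false_or, hpool, PySem.List.mem_sorted, List.mem_flatMap,
      List.mem_map]
    constructor
    · rintro ⟨⟨a, ha, c, hc, rfl⟩, hnd⟩
      refine ⟨a, ha, c, hc, ?_, rfl⟩
      rcases not_and_or.mp hnd with h | h
      · exact Or.inl (not_le.mp h)
      · exact Or.inr (not_le.mp h)
    · rintro ⟨a, ha, c, hc, hP, rfl⟩
      refine ⟨⟨a, ha, c, hc, rfl⟩, ?_⟩
      rintro ⟨h1, h2⟩
      rcases hP with h | h
      · exact absurd h1 (not_le.mpr h)
      · exact absurd h2 (not_le.mpr h)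
  · exact hBsorted
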